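-- pv_equiv track=rewrite | github.com/informalsystems/modelator-py | modelator/util/tlc/stdout_to_informal_trace_format.py | split_into_states
-- ===== SOURCE A (Python) =====
-- import typing
--
-- def split_into_states(lines) -> typing.List[str]:
--     """
--     Returns a list of states.
--
--     A trace from TLC is a sequence of [header, content] pairs.
--     The headers are not valid TLA+.
--     This function returns a list where each item is valid TLA+ content.
--     """
--     ret = []
--     HEADER = "State "
--     header_cnt = 0
--     header_ix = -1
--     for i, line in enumerate(lines):
--         if line.startswith(HEADER):
--             if 0 < header_cnt:
--                 ret.append(lines[header_ix + 1 : i])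
--             header_ix = i
--             header_cnt += 1
--     if 0 < header_cnt:
--         ret.append(lines[header_ix + 1 :])
--
--     return ret
-- ===== SOURCE B (Python) =====
-- def split_into_states(lines):
--     idx = [i for i, line in enumerate(lines) if line.startswith("State ")]
--     return [
--         lines[idx[j] + 1 : (idx[j + 1] if j + 1 < len(idx) else len(lines))]
--         for j in range(len(idx))
--     ]
-- ===== Notes on version B (the rewrite author's own statement) =====
-- stated objective: alternative
-- what changed: Replaces the fused single-pass counter/previous-header-index bookkeeping with two separate passes: first collect all header positions, then reassemble each block by slicing between consecutive header positions.
import Mathlib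
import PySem

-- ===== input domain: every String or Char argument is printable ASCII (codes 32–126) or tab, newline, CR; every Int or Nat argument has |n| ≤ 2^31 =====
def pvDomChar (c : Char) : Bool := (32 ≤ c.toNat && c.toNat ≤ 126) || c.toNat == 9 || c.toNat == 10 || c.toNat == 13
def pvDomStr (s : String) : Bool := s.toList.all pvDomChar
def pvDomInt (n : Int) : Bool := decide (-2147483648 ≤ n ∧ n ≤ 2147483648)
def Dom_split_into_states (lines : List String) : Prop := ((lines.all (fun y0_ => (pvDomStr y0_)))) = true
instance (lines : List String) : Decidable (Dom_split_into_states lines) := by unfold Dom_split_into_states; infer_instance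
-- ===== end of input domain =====

-- B changes the decomposition: one pass collecting header positions, then a separate
-- reassembly pass slicing between consecutive header positions (same cost; objective: alternative).

-- ===== PORT A =====
-- A's single fused loop over enumerate(lines) with state (ret, header_cnt, header_ix).
def split_into_states (lines : List String) : List (List String) :=
  let fin := (PySem.List.enumerate lines).foldl
    (fun (s : List (List String) × Int × Int) (p : Int × String) =>
      if PySem.Str.startswith p.2 "State " then
        ((if 0 < s.2.1 then s.1 ++ [PySem.List.slice lines (some (s.2.2 + 1)) (some p.1)] else s.1),
         s.2.1 + 1, p.1)
      else s)
    ([], 0, -1)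
  if 0 < fin.2.1 then fin.1 ++ [PySem.List.slice lines (some (fin.2.2 + 1)) none] else fin.1

-- ===== PORT B =====
def split_into_states_alt (lines : List String) : List (List String) :=
  let idx := (PySem.List.enumerate lines).filterMap
    (fun p => if PySem.Str.startswith p.2 "State " then some p.1 else none)
  (PySem.List.pyRange 0 (idx.length : Int) 1).map (fun j =>
    PySem.List.slice lines (some (PySem.List.pyGetD idx j 0 + 1))
      (some (if j + 1 < (idx.length : Int) then PySem.List.pyGetD idx (j + 1) 0
             else (lines.length : Int))))

-- ===== PRECONDITION & SPEC =====
def Spec_split_into_states (lines : List String) (out : List (List String)) : Prop := out = split_into_states_alt lines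
instance (lines : List String) (out : List (List String)) : Decidable (Spec_split_into_states lines out) := by unfold Spec_split_into_states; infer_instance

-- ===== CLAIM (what is proved, stated in full; the proofs are below) =====
def Claim_equal_split_into_states : Prop := ∀ (lines : List String), Dom_split_into_states lines → Spec_split_into_states lines (split_into_states lines)

-- ===== LEMMAS AND PROOFS =====

-- common target: the blocks delimited by consecutive header positions
def pvBuild (lines : List String) : List Int → List (List String)
  | [] => []
  | [a] => [PySem.List.slice lines (some (a + 1)) (some (lines.length : Int))]
  | a :: b :: t => PySem.List.slice lines (some (a + 1)) (some b) :: pvBuild lines (b :: t)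

-- the inner blocks A's loop has appended, given whether a header was already seen and its index
def pvChunks (lines : List String) : Bool → Int → List Int → List (List String)
  | _, _, [] => []
  | c, ix, a :: t => (if c then [PySem.List.slice lines (some (ix + 1)) (some a)] else []) ++ pvChunks lines true a t

def pvHdrs (lines : List String) : List Int :=
  (PySem.List.enumerate lines).filterMap
    (fun p => if PySem.Str.startswith p.2 "State " then some p.1 else none)

-- B's comprehension body, as a function of the Nat loop index
def pvF (lines : List String) (hs : List Int) (k : Nat) : List String :=
  PySem.List.slice lines (some (PySem.List.pyGetD hs (k : Int) 0 + 1))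
    (some (if (k : Int) + 1 < (hs.length : Int) then PySem.List.pyGetD hs ((k : Int) + 1) 0
           else (lines.length : Int)))

lemma pvFoldA (lines : List String) (e : List (Int × String)) :
    ∀ (ret : List (List String)) (cnt ix : Int), 0 ≤ cnt →
    e.foldl
      (fun (s : List (List String) × Int × Int) (p : Int × String) =>
        if PySem.Str.startswith p.2 "State " then
          ((if 0 < s.2.1 then s.1 ++ [PySem.List.slice lines (some (s.2.2 + 1)) (some p.1)] else s.1),
           s.2.1 + 1, p.1)
        else s)
      (ret, cnt, ix)
    = (ret ++ pvChunks lines (decide (0 < cnt)) ix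
         (e.filterMap (fun p => if PySem.Str.startswith p.2 "State " then some p.1 else none)),
       cnt + (e.filterMap (fun p => if PySem.Str.startswith p.2 "State " then some p.1 else none)).length,
       (e.filterMap (fun p => if PySem.Str.startswith p.2 "State " then some p.1 else none)).getLastD ix) := by
  induction e with
  | nil => intro ret cnt ix _; simp [pvChunks]
  | cons p e ih =>
      intro ret cnt ix hc
      by_cases h : PySem.Str.startswith p.2 "State " = true
      · simp only [List.foldl_cons, List.filterMap_cons, h, if_pos]
        rw [ih _ (cnt + 1) p.1 (by omega)]
        have h1 : decide (0 < cnt + 1) = true := by simp; omega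
        by_cases h0 : 0 < cnt
        · simp only [h0, if_pos, h1, decide_true, pvChunks, List.getLastD_cons,
            List.length_cons, Prod.mk.injEq]
          exact ⟨by simp, by omega, trivial⟩
        · simp only [h0, h1, if_false, decide_false, pvChunks, List.getLastD_cons,
            List.length_cons, Prod.mk.injEq]
          exact ⟨by simp, by omega, trivial⟩
      · simp only [List.foldl_cons, List.filterMap_cons, h]
        simp only [Bool.false_eq_true, if_false]
        exact ih ret cnt ix hc

lemma pvChunks_build (lines : List String) :
    ∀ (t : List Int) (a : Int),
    pvChunks lines true a t ++ [PySem.List.slice lines (some (t.getLastD a + 1)) (some (lines.length : Int))]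
    = pvBuild lines (a :: t) := by
  intro t
  induction t with
  | nil => intro a; simp [pvChunks, pvBuild]
  | cons b t' ih =>
      intro a
      simp only [pvChunks, pvBuild, List.getLastD_cons]
      rw [← ih b]
      simp

lemma pvEnum_fst_nonneg : ∀ (xs : List String) (s : Int), 0 ≤ s →
    ∀ p ∈ PySem.List.enumerate xs s, s ≤ p.1 := by
  intro xs
  induction xs with
  | nil => intro s _ p hp; simp [PySem.List.enumerate] at hp
  | cons x xs ih =>
      intro s hs p hp
      rw [PySem.List.enumerate_cons, List.mem_cons] at hp
      rcases hp with hp | hp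
      · simp [hp]
      · have := ih (s + 1) (by omega) p hp; omega

lemma pvHdrs_nonneg (lines : List String) : ∀ x ∈ pvHdrs lines, 0 ≤ x := by
  intro x hx
  unfold pvHdrs at hx
  rw [List.mem_filterMap] at hx
  obtain ⟨p, hp, hpx⟩ := hx
  have h := pvEnum_fst_nonneg lines 0 le_rfl p hp
  simp at hpx
  omega

-- lines[a:] = lines[a:len(lines)] for 0 ≤ a
lemma pvSlice_open (xs : List String) (a : Int) (ha : 0 ≤ a) :
    PySem.List.slice xs (some a) none = PySem.List.slice xs (some a) (some (xs.length : Int)) := by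
  rw [PySem.List.slice_toNat (a := a) (b := (xs.length : Int)) xs ha (by positivity)]
  rw [PySem.List.slice_from xs ha]
  rw [Int.toNat_natCast, List.take_of_length_le (by simp)]

lemma pvA_eq_build (lines : List String) :
    split_into_states lines = pvBuild lines (pvHdrs lines) := by
  unfold split_into_states
  rw [pvFoldA lines (PySem.List.enumerate lines) [] 0 (-1) le_rfl]
  simp only [List.nil_append, zero_add]
  rcases hh : pvHdrs lines with _ | ⟨a, t⟩ <;> unfold pvHdrs at hh <;> rw [hh]
  · simp [pvChunks, pvBuild]
  · have hpos : (0 : Int) < ((a :: t).length : Nat) := by simp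
    simp only [hpos, if_pos, pvChunks, List.getLastD_cons]
    have hnn : 0 ≤ t.getLastD a := by
      apply pvHdrs_nonneg lines
      rw [pvHdrs, hh]
      rcases t.eq_nil_or_concat with rfl | ⟨l', b, rfl⟩
      · simp
      · simp
    rw [pvSlice_open lines (t.getLastD a + 1) (by omega)]
    exact pvChunks_build lines t a

lemma pvF_succ (lines : List String) (a : Int) (t : List Int) (k : Nat) :
    pvF lines (a :: t) (k + 1) = pvF lines t k := by
  simp only [pvF, List.length_cons]
  have hc : ((k + 2 : Nat) : Int) < ((t.length + 1 : Nat) : Int) ↔ (k : Int) + 1 < (t.length : Int) := by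
    push_cast; omega
  rw [show ((k + 1 : Nat) : Int) + 1 = ((k + 2 : Nat) : Int) by push_cast; ring,
      show (k : Int) + 1 = ((k + 1 : Nat) : Int) by push_cast; ring]
  simp only [PySem.List.pyGetD_natCast, List.getD_cons_succ]
  rw [show ((k + 1 : Nat) : Int) = (k : Int) + 1 by push_cast; ring]
  congr 1
  rw [if_congr hc rfl rfl]

lemma pvRangeMap (lines : List String) : ∀ hs : List Int,
    (List.range hs.length).map (pvF lines hs) = pvBuild lines hs := by
  intro hs
  induction hs with
  | nil => simp [pvBuild]
  | cons a t ih =>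
      rw [List.length_cons, List.range_succ_eq_map, List.map_cons, List.map_map]
      have hmap : (List.range t.length).map (pvF lines (a :: t) ∘ Nat.succ)
          = (List.range t.length).map (pvF lines t) :=
        List.map_congr_left (fun k _ => by simpa [Nat.succ_eq_add_one] using pvF_succ lines a t k)
      rw [hmap, ih]
      cases t with
      | nil => simp [pvF, pvBuild, PySem.List.pyGetD]
      | cons b t' =>
          simp only [pvBuild]
          congr 1
          simp only [pvF, List.length_cons]
          norm_num [PySem.List.pyGetD]

lemma pvB_eq_build (lines : List String) :
    split_into_states_alt lines = pvBuild lines (pvHdrs lines) := by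
  unfold split_into_states_alt
  dsimp only
  rw [show (PySem.List.enumerate lines).filterMap
        (fun p => if PySem.Str.startswith p.2 "State " then some p.1 else none) = pvHdrs lines from rfl]
  rw [PySem.List.pyRange_one 0 ((pvHdrs lines).length : Int), List.map_map]
  have hlen : (((pvHdrs lines).length : Int) - 0).toNat = (pvHdrs lines).length := by simp
  rw [hlen, ← pvRangeMap lines (pvHdrs lines)]
  apply List.map_congr_left
  intro k _
  simp [pvF]

-- ===== VERDICT (by name: the statement is the Claim_ definition above) =====
theorem split_into_states_spec : Claim_equal_split_into_states := by
  intro lines _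
  unfold Spec_split_into_states
  rw [pvA_eq_build, pvB_eq_build]
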